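-- pv_equiv track=rewrite | github.com/fygar256/binary_file_editor_like_vi-bi | bi.py | comment
-- ===== SOURCE A (Python) =====
-- def comment(line):
--     """
--     文字列 line から、'\'でエスケープされない';'以降を無視し、
--     '\'でエスケープされた';'は';'に置き換える関数。
--
--     Args:
--         line: 処理対象の文字列。
--
--     Returns:
--         処理後の文字列。
--     """
--     result = []
--     escaped = False
--     ignore = False
--     for char in line:
--         if ignore:
--             continue
--         if char == '\\':
--             escaped = True
--             continue
--         if char == ';' and not escaped:
--             ignore = True
--         elif char == ';' and escaped:
--             result.append(';')
--             escaped = False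
--         else:
--             result.append(char)
--             escaped = False
--     return "".join(result)
-- ===== SOURCE B (Python) =====
-- def comment(line):
--     cut = len(line)
--     for i, ch in enumerate(line):
--         if ch == ';' and (i == 0 or line[i - 1] != '\\'):
--             cut = i
--             break
--     return line[:cut].replace('\\', '')
-- ===== Notes on version B (the rewrite author's own statement) =====
-- stated objective: faster
-- what changed: Replaces the per-character escape/ignore state machine that appends characters one by one with a boundary scan locating the first unescaped semicolon, then a slice and one bulk replace deleting the backslashes.
import Mathlib
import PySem

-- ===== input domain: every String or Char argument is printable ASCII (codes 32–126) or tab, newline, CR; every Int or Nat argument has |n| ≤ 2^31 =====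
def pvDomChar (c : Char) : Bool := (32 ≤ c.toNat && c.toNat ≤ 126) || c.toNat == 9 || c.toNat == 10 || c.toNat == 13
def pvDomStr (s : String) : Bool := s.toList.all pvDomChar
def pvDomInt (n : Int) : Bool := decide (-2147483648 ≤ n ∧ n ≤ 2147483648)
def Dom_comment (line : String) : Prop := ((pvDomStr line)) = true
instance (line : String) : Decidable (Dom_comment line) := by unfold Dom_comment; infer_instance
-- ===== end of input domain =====

-- B replaces A's escape/ignore state machine with a find-first-unescaped-';' boundary scan
-- plus slice and bulk backslash removal (objective: simpler).

-- ===== PORT A =====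
-- state = (result, escaped, ignore), exactly A's loop body
def commentStep (st : List Char × Bool × Bool) (c : Char) : List Char × Bool × Bool :=
  if st.2.2 then st
  else if c = '\\' then (st.1, true, st.2.2)
  else if c = ';' && !st.2.1 then (st.1, st.2.1, true)
  else if c = ';' && st.2.1 then (st.1 ++ [';'], false, st.2.2)
  else (st.1 ++ [c], false, st.2.2)

def comment (line : String) : String :=
  String.mk (line.toList.foldl commentStep ([], false, false)).1

-- ===== PORT B =====
-- cut index: first position holding ';' not immediately preceded by '\'; prev is the previous char
def commentCut : List Char → Option Char → Nat
  | [], _ => 0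
  | c :: cs, prev => if c = ';' && prev ≠ some '\\' then 0 else 1 + commentCut cs (some c)

def comment_alt (line : String) : String :=
  String.mk (((line.toList.take (commentCut line.toList none)).filter (fun c => c ≠ '\\')))

-- ===== PRECONDITION & SPEC =====
def Spec_comment (line : String) (out : String) : Prop := out = comment_alt line
instance (line : String) (out : String) : Decidable (Spec_comment line out) := by unfold Spec_comment; infer_instance

-- ===== CLAIM (what is proved, stated in full; the proofs are below) =====
def Claim_equal_comment : Prop := ∀ (line : String), Dom_comment line → Spec_comment line (comment line)

-- ===== LEMMAS AND PROOFS =====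

-- loop invariant: the fold from state (res, esc, false) produces res ++ the filtered prefix
-- before the first unescaped ';', where esc records whether the previous char was '\'
theorem comment_loop_eq (cs : List Char) : ∀ (res : List Char) (esc : Bool) (prev : Option Char),
    (esc = true ↔ prev = some '\\') →
    (cs.foldl commentStep (res, esc, false)).1
      = res ++ (cs.take (commentCut cs prev)).filter (fun c => c ≠ '\\') := by
  induction cs with
  | nil => intro res esc prev _; simp [commentCut]
  | cons c cs ih =>
    intro res esc prev hp
    rw [List.foldl_cons]
    by_cases hb : c = '\\'
    · subst hb
      have hstep : commentStep (res, esc, false) '\\' = (res, true, false) := by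
        simp [commentStep]
      rw [hstep, ih res true (some '\\') (by simp)]
      simp [commentCut, Nat.one_add, List.take_succ_cons]
    · by_cases hs : c = ';'
      · subst hs
        cases esc with
        | true =>
          have hprev : prev = some '\\' := hp.mp rfl
          have hstep : commentStep (res, true, false) ';' = (res ++ [';'], false, false) := by
            simp [commentStep]
          rw [hstep, ih (res ++ [';']) false (some ';') (by simp)]
          simp [commentCut, hprev, Nat.one_add, List.take_succ_cons]
        | false =>
          have hprev : prev ≠ some '\\' := fun h => absurd (hp.mpr h) (by simp)
          have hstep : commentStep (res, false, false) ';' = (res, false, true) := by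
            simp [commentStep]
          rw [hstep]
          clear ih hp hstep
          -- ignore = true: the rest of the fold leaves the state unchanged
          have hskip : List.foldl commentStep (res, false, true) cs = (res, false, true) := by
            induction cs with
            | nil => rfl
            | cons d ds ih2 => simpa [commentStep] using ih2
          rw [hskip]
          simp [commentCut, hprev]
      · have hstep : commentStep (res, esc, false) c = (res ++ [c], false, false) := by
          simp [commentStep, hb, hs]
        rw [hstep, ih (res ++ [c]) false (some c) (by simp [hb])]
        simp [commentCut, hs, hb, Nat.one_add, List.take_succ_cons]

-- ===== VERDICT (by name: the statement is the Claim_ definition above) =====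
theorem comment_spec : Claim_equal_comment := by
  intro line _
  unfold Spec_comment comment comment_alt
  rw [comment_loop_eq line.toList [] false none (by simp)]
  simp
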